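-- pv_equiv track=rewrite | github.com/LMN1590/Kakurasu_Nonogram_Heuristic_Solver | Nonogram/BlindNonogram.py | check
-- ===== SOURCE A (Python) =====
-- def check(row,col,size,matrix):
--     for i in range(size):
--         temp_list=[]
--         temp=0
--         for j in range(size):
--             if(matrix[i][j]==0):
--                 if(temp!=0):
--                     temp_list.append(temp)
--                     temp=0
--             else: temp+=matrix[i][j]
--         if(temp!=0): temp_list.append(temp)
--         if(temp_list!=col[i]): return False
--
--         temp_list=[]
--         temp=0
--         for j in range(size):
--             if(matrix[j][i]==0):
--                 if(temp!=0):
--                     temp_list.append(temp)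
--                     temp=0
--             else: temp+=matrix[j][i]
--         if(temp!=0): temp_list.append(temp)
--         if(temp_list!=row[i]): return False
--     return True
-- ===== SOURCE B (Python) =====
-- def _runs(cells):
--     # divide at the first zero: sum the prefix, recurse on the rest
--     if not cells:
--         return []
--     try:
--         k = cells.index(0)
--     except ValueError:
--         s = sum(cells)
--         return [s] if s else []
--     head = sum(cells[:k])
--     tail = _runs(cells[k + 1:])
--     return ([head] if head else []) + tail
--
-- def check(row, col, size, matrix):
--     idx = range(size)
--     return all(_runs([matrix[i][j] for j in idx]) == col[i] for i in idx) \
--        and all(_runs([matrix[j][i] for j in idx]) == row[i] for i in idx)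
-- ===== Notes on version B (the rewrite author's own statement) =====
-- stated objective: alternative
-- what changed: Replaces A's interleaved single-pass accumulator loops (running temp flushed at zeros, early returns) by a divide-at-first-zero recursion: find the first zero with list.index, sum the slice before it, recurse on the slice after it, keeping non-zero segment sums; all row checks are done in one pass, then all column checks.
-- outside the precondition, e.g. on check([], [[2]], 1, [[1]]): A returns False, B returns False
import Mathlib
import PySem

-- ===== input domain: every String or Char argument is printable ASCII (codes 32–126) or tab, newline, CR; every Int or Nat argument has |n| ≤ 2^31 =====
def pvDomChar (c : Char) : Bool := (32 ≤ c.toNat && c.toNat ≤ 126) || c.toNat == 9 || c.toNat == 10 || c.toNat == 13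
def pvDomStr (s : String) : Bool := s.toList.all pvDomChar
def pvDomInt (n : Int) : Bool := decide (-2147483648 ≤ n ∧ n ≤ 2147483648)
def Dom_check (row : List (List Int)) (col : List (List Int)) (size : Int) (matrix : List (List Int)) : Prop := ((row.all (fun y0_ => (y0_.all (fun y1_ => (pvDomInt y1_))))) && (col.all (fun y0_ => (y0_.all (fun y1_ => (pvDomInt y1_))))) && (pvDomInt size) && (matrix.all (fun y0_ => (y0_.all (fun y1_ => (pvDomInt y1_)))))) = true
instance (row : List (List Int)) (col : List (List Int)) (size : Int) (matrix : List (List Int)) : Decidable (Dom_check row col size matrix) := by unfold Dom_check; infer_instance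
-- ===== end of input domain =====

-- B replaces A's interleaved per-index accumulator loops by a divide-at-first-zero recursion
-- (index the first zero, sum the slice before it, recurse on the slice after it), doing all
-- row checks and then all column checks; same overall cost, a different decomposition.

-- ===== PORT A =====
-- matrix[i][j]; under Pre_check every access is in range (defaults are never hit)
def cellAt (matrix : List (List Int)) (i j : Int) : Int :=
  (PySem.List.pyGet? ((PySem.List.pyGet? matrix i).getD []) j).getD 0

-- the 'for i in range(size)' loop of A, with its early 'return False's
def checkLoopA (row col : List (List Int)) (size : Int) (matrix : List (List Int)) : List Int → Bool
  | [] => true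
  | i :: rest =>
      let s1 := (PySem.List.pyRange 0 size 1).foldl
        (fun s j =>
          if cellAt matrix i j = 0 then
            (if s.2 ≠ 0 then (s.1 ++ [s.2], (0 : Int)) else s)
          else (s.1, s.2 + cellAt matrix i j)) (([] : List Int), (0 : Int))
      let tl1 := if s1.2 ≠ 0 then s1.1 ++ [s1.2] else s1.1
      if tl1 ≠ (PySem.List.pyGet? col i).getD [] then false
      else
        let s2 := (PySem.List.pyRange 0 size 1).foldl
          (fun s j =>
            if cellAt matrix j i = 0 then
              (if s.2 ≠ 0 then (s.1 ++ [s.2], (0 : Int)) else s)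
            else (s.1, s.2 + cellAt matrix j i)) (([] : List Int), (0 : Int))
        let tl2 := if s2.2 ≠ 0 then s2.1 ++ [s2.2] else s2.1
        if tl2 ≠ (PySem.List.pyGet? row i).getD [] then false
        else checkLoopA row col size matrix rest

def check (row : List (List Int)) (col : List (List Int)) (size : Int) (matrix : List (List Int)) : Bool :=
  checkLoopA row col size matrix (PySem.List.pyRange 0 size 1)

-- ===== PORT B =====
-- _runs: find the first zero with list.index; sum the slice before it, recurse after it
def runsB (cells : List Int) : List Int :=
  if cells = [] then []
  else
    match _h : PySem.List.index? cells 0 with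
    | none =>
        let s := cells.sum
        if s ≠ 0 then [s] else []
    | some k =>
        let head := (PySem.List.slice cells none (some (k : Int))).sum
        let tail := runsB (PySem.List.slice cells (some ((k : Int) + 1)) none)
        (if head ≠ 0 then [head] else []) ++ tail
termination_by cells.length
decreasing_by
  rename_i hne
  have hk : ((k : Int) + 1).toNat = k + 1 := by omega
  rw [PySem.List.slice_from cells (by omega : (0:Int) ≤ (k : Int) + 1), hk, List.length_drop]
  have hp : 0 < cells.length := List.length_pos_of_ne_nil hne
  omega

def check_alt (row : List (List Int)) (col : List (List Int)) (size : Int) (matrix : List (List Int)) : Bool :=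
  let idxs := PySem.List.pyRange 0 size 1
  (idxs.all (fun i => runsB (idxs.map (fun j => cellAt matrix i j)) == (PySem.List.pyGet? col i).getD [])) &&
  (idxs.all (fun i => runsB (idxs.map (fun j => cellAt matrix j i)) == (PySem.List.pyGet? row i).getD []))

-- ===== PRECONDITION & SPEC =====
-- Pre_check is the closed-form shape condition making every index A touches valid (the first
-- `size` entries of row, col and matrix exist and those matrix rows have ≥ size entries);
-- outside it A raises IndexError — except on some ragged inputs where A happens to return
-- False at a clue comparison before reaching the missing index, which this conservative
-- closed form also excludes (see the cite in the claim).
def Pre_check (row : List (List Int)) (col : List (List Int)) (size : Int) (matrix : List (List Int)) : Prop :=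
  size.toNat ≤ row.length ∧ size.toNat ≤ col.length ∧ size.toNat ≤ matrix.length ∧
    ∀ r ∈ matrix.take size.toNat, size.toNat ≤ r.length
instance (row : List (List Int)) (col : List (List Int)) (size : Int) (matrix : List (List Int)) : Decidable (Pre_check row col size matrix) := by unfold Pre_check; infer_instance

def pvWitness_check : List (List Int) × List (List Int) × Int × List (List Int) :=
  ([[1]], [[1]], 1, [[1]])

def Spec_check (row : List (List Int)) (col : List (List Int)) (size : Int) (matrix : List (List Int)) (out : Bool) : Prop := out = check_alt row col size matrix
instance (row : List (List Int)) (col : List (List Int)) (size : Int) (matrix : List (List Int)) (out : Bool) : Decidable (Spec_check row col size matrix out) := by unfold Spec_check; infer_instance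

-- ===== CLAIM (what is proved, stated in full; the proofs are below) =====
def Claim_equal_check : Prop := ∀ (row : List (List Int)) (col : List (List Int)) (size : Int) (matrix : List (List Int)), Dom_check row col size matrix → Pre_check row col size matrix → Spec_check row col size matrix (check row col size matrix)

-- ===== LEMMAS AND PROOFS =====

-- reference run builder: A's accumulator semantics as a recursion on the cell list
def runsC (temp : Int) : List Int → List Int
  | [] => if temp ≠ 0 then [temp] else []
  | x :: rest => if x = 0 then (if temp ≠ 0 then [temp] else []) ++ runsC 0 rest
                 else runsC (temp + x) rest

theorem foldA_eq (f : Int → Int) (js : List Int) :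
    ∀ (tl : List Int) (temp : Int),
      (let s := js.foldl
        (fun s j =>
          if f j = 0 then (if s.2 ≠ 0 then (s.1 ++ [s.2], (0 : Int)) else s)
          else (s.1, s.2 + f j)) (tl, temp);
       if s.2 ≠ 0 then s.1 ++ [s.2] else s.1) = tl ++ runsC temp (js.map f) := by
  induction js with
  | nil =>
      intro tl temp
      simp only [List.foldl_nil, List.map_nil, runsC]
      split_ifs <;> simp
  | cons j js ih =>
      intro tl temp
      simp only [List.foldl_cons, List.map_cons, runsC]
      by_cases h : f j = 0
      · simp only [h, if_true]
        by_cases ht : temp ≠ 0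
        · simp only [if_pos ht]
          rw [ih (tl ++ [temp]) 0]
          simp [List.append_assoc]
        · simp only [ht, if_false]
          push Not at ht
          rw [ih tl temp, ht]
          simp
      · simp only [h, if_false]
        rw [ih tl (temp + f j)]

theorem runsC_block (g : List Int) :
    ∀ (temp : Int) (rest : List Int), (∀ v ∈ g, ¬ v = 0) →
      runsC temp (g ++ rest) = runsC (temp + g.sum) rest := by
  induction g with
  | nil => intro temp rest _; simp
  | cons x g ih =>
      intro temp rest hnz
      have hx : ¬ x = 0 := hnz x (by simp)
      simp only [List.cons_append, runsC, if_neg hx]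
      rw [ih (temp + x) rest (fun v hv => hnz v (by simp [hv]))]
      rw [List.sum_cons, add_assoc]

theorem runsB_eq (cells : List Int) : runsB cells = runsC 0 cells := by
  induction cells using runsB.induct with
  | case1 => simp [runsB, runsC]
  | case2 cells hne h _ =>
      rw [runsB, if_neg hne, h]
      have h0 : (0 : Int) ∉ cells := (PySem.List.index?_eq_none_iff _ _).mp h
      have := runsC_block cells 0 [] (fun v hv hv0 => h0 (hv0 ▸ hv))
      simp only [List.append_nil, zero_add] at this
      rw [this, runsC]
  | case3 cells hne h _ =>
      rw [runsB, if_neg hne, h]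
      have h0 : (0 : Int) ∉ cells := (PySem.List.index?_eq_none_iff _ _).mp h
      have := runsC_block cells 0 [] (fun v hv hv0 => h0 (hv0 ▸ hv))
      simp only [List.append_nil, zero_add] at this
      rw [this, runsC]
  | case4 cells hne k h ih =>
      obtain ⟨pre, suf, hsplit, hlen, hnm⟩ := (PySem.List.index?_eq_some_iff _ _ _).mp h
      rw [runsB, if_neg hne, h]
      have hto : PySem.List.slice cells none (some (k : Int)) = pre := by
        rw [PySem.List.slice_to_natCast, hsplit, ← hlen, List.take_left]
      have hfrom : PySem.List.slice cells (some ((k : Int) + 1)) none = suf := by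
        have hk : ((k : Int) + 1).toNat = k + 1 := by omega
        rw [PySem.List.slice_from cells (by omega : (0:Int) ≤ (k : Int) + 1), hk,
          hsplit, ← hlen, ← List.drop_drop, List.drop_left]
        simp
      rw [hfrom] at ih
      dsimp only
      rw [hto, hfrom, ih, hsplit]
      have := runsC_block pre 0 (0 :: suf) (fun v hv hv0 => hnm (hv0 ▸ hv))
      rw [this, runsC]
      simp

theorem all_and (is : List Int) (p q : Int → Bool) :
    is.all (fun i => p i && q i) = (is.all p && is.all q) := by
  induction is with
  | nil => simp
  | cons a is ih =>
      simp only [List.all_cons, ih]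
      cases p a <;> cases q a <;> simp

theorem checkLoopA_eq (row col : List (List Int)) (size : Int) (matrix : List (List Int))
    (is : List Int) :
    checkLoopA row col size matrix is =
      is.all (fun i =>
        (runsB ((PySem.List.pyRange 0 size 1).map (fun j => cellAt matrix i j)) == (PySem.List.pyGet? col i).getD []) &&
        (runsB ((PySem.List.pyRange 0 size 1).map (fun j => cellAt matrix j i)) == (PySem.List.pyGet? row i).getD [])) := by
  induction is with
  | nil => rfl
  | cons i is ih =>
      rw [checkLoopA]
      have h1 := foldA_eq (fun j => cellAt matrix i j) (PySem.List.pyRange 0 size 1) [] 0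
      have h2 := foldA_eq (fun j => cellAt matrix j i) (PySem.List.pyRange 0 size 1) [] 0
      simp only [List.nil_append] at h1 h2
      simp only [h1, h2, ← runsB_eq, List.all_cons, ih]
      by_cases e1 : runsB ((PySem.List.pyRange 0 size 1).map (fun j => cellAt matrix i j)) = (PySem.List.pyGet? col i).getD []
      · by_cases e2 : runsB ((PySem.List.pyRange 0 size 1).map (fun j => cellAt matrix j i)) = (PySem.List.pyGet? row i).getD []
        · simp [e1, e2]
        · simp [e1, e2]
      · simp [e1]

-- ===== VERDICT (by name: the statement is the Claim_ definition above) =====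
theorem check_spec : Claim_equal_check := by
  intro row col size matrix _ _
  unfold Spec_check check check_alt
  rw [checkLoopA_eq, all_and]
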